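-- pv_equiv track=rewrite | github.com/tnotenson/quantum-chaos | tomi_tfim_parity.py | ZZona
-- ===== SOURCE A (Python) =====
-- def to_bs(x,n,base=2): # binary to string
--     x=x+1
--     if x == 0:
--         return [0 for k in range(n)]
--
--     digs = []
--     while x:
--         digs.append(int(x % base))
--         x = int(x / base)
--
--     for k in range(n-len(digs)):
--         digs.append(0)
--     digs.reverse()
--
--     return digs
--
-- def ZZona(a,n): #ASSUMES NN
--
--
--     ap={}
--     for u,coef0 in a.items():
--
--         s = to_bs(u,n);
--
--         coef=0
--         for i in range(n-1):
--             if s[i]==s[i+1]: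
--                 coef+=1
--             else:
--                 coef-=1
--
--         ap[u] = coef*coef0
--
--     return ap
-- ===== SOURCE B (Python) =====
-- def ZZona(a, n):  # ASSUMES NN
--     # Per key u the coefficient counts equal-vs-unequal adjacent pairs among the
--     # n most significant binary digits (zero-padded) of |u+1|; read them straight
--     # off the integer with bit_length/shifts instead of building a digit list.
--     if n <= 1:
--         return {u: 0 for u in a}
--     out = {}
--     for u, c in a.items():
--         v = abs(u + 1)
--         b = v.bit_length()
--         top = v >> (b - n) if b > n else v
--         coef = 0
--         for i in range(n - 1):
--             coef += 1 if ((top >> i) & 1) == ((top >> (i + 1)) & 1) else -1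
--         out[u] = coef * c
--     return out
-- ===== Notes on version B (the rewrite author's own statement) =====
-- stated objective: idiomatic
-- what changed: B replaces to_bs's build-digit-list/pad/reverse/index-scan with direct integer bit arithmetic: v=abs(u+1) (the truncating int(x/2) loop in A yields the binary digits of |x|), the top-n-bit window v >> (bit_length-n), and adjacent bits compared by shift-and-mask, with no intermediate list.
import Mathlib
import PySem

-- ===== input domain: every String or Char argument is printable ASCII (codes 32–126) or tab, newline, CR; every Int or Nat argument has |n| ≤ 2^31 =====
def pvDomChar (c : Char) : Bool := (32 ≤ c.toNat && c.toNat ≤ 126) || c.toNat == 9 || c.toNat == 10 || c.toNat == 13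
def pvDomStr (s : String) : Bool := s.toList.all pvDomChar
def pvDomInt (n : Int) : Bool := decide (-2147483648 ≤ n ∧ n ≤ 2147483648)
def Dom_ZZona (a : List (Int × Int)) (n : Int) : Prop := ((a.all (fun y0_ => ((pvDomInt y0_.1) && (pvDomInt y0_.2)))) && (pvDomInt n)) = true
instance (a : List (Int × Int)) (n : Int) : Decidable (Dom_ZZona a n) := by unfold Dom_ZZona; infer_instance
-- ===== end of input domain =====

-- B replaces A's digit-list build/pad/reverse/index scan by direct integer bit arithmetic
-- (abs, bit_length, shifts); objective: idiomatic, no speed claim.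

-- ===== PORT A =====

-- termination fact for the `while x:` loop (cited in decreasing_by)
theorem pv_truncdiv_two_natAbs (x : Int) : (PySem.Int.truncdiv x 2).natAbs = x.natAbs / 2 := by
  show (x.tdiv 2).natAbs = x.natAbs / 2
  cases x with
  | ofNat m => rfl
  | negSucc m => simp [Int.tdiv]; omega

-- the `while x: digs.append(int(x % 2)); x = int(x / 2)` loop of to_bs
def toBsLoop (x : Int) : List Int :=
  if x = 0 then []
  else PySem.Int.mod x 2 :: toBsLoop (PySem.Int.truncdiv x 2)
termination_by x.natAbs
decreasing_by
  rename_i h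
  rw [pv_truncdiv_two_natAbs]
  omega

-- to_bs(x, n) with the module's default base=2 (the only base ZZona uses)
def to_bs (x0 : Int) (n : Int) : List Int :=
  let x := x0 + 1
  if x = 0 then List.replicate n.toNat 0
  else
    let digs := toBsLoop x
    let digs := digs ++ List.replicate (n - (digs.length : Int)).toNat 0
    digs.reverse

-- the `for i in range(n-1)` coefficient loop; the `_, _` branch (IndexError) is never
-- reached: 0 ≤ i < i+1 ≤ n-1 < len(s), exactly as in the Python
def coefA (s : List Int) (n : Int) : Int :=
  (PySem.List.pyRange 0 (n - 1) 1).foldl (fun coef i =>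
    match PySem.List.pyGet? s i, PySem.List.pyGet? s (i + 1) with
    | some si, some sj => if si = sj then coef + 1 else coef - 1
    | _, _ => coef) 0

def ZZona (a : List (Int × Int)) (n : Int) : List (Int × Int) :=
  (a.foldl (fun ap (p : Int × Int) =>
    PySem.Dict.insert ap p.1 (coefA (to_bs p.1 n) n * p.2)) PySem.Dict.empty).items

-- ===== PORT B =====

-- the `for i in range(n-1)` loop of Source B: adjacent bits of `top` via shift-and-mask
def coefB (top : Int) (n : Int) : Int :=
  (PySem.List.pyRange 0 (n - 1) 1).foldl (fun coef i =>
    coef + (if PySem.Int.band (top >>> i.toNat) 1 = PySem.Int.band (top >>> (i.toNat + 1)) 1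
            then 1 else -1)) 0

def ZZona_alt (a : List (Int × Int)) (n : Int) : List (Int × Int) :=
  if n ≤ 1 then
    (a.foldl (fun out (p : Int × Int) => PySem.Dict.insert out p.1 0) PySem.Dict.empty).items
  else
    (a.foldl (fun out (p : Int × Int) =>
      let v : Int := |p.1 + 1|
      let b : Nat := PySem.Int.bitLength v
      let top : Int := if n < (b : Int) then v >>> (b - n.toNat) else v
      PySem.Dict.insert out p.1 (coefB top n * p.2)) PySem.Dict.empty).items

-- ===== PRECONDITION & SPEC =====
def Spec_ZZona (a : List (Int × Int)) (n : Int) (out : List (Int × Int)) : Prop := out = ZZona_alt a n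
instance (a : List (Int × Int)) (n : Int) (out : List (Int × Int)) : Decidable (Spec_ZZona a n out) := by unfold Spec_ZZona; infer_instance

-- ===== CLAIM (what is proved, stated in full; the proofs are below) =====
def Claim_equal_ZZona : Prop := ∀ (a : List (Int × Int)) (n : Int), Dom_ZZona a n → Spec_ZZona a n (ZZona a n)

-- ===== LEMMAS AND PROOFS =====

-- proof-side: LSB-first binary digits of a natural number, and its j-th bit as an Int
def natBits (m : Nat) : List Int :=
  if m = 0 then [] else ((m % 2 : Nat) : Int) :: natBits (m / 2)

def bv (m j : Nat) : Int := ((m / 2 ^ j % 2 : Nat) : Int)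

def gPair (m a1 a2 : Nat) : Int := if bv m a1 = bv m a2 then 1 else -1

theorem gPair_comm (m a1 a2 : Nat) : gPair m a1 a2 = gPair m a2 a1 := by
  rcases eq_or_ne (bv m a1) (bv m a2) with h | h
  · simp [gPair, h]
  · simp [gPair, h, Ne.symm h]

theorem sum_reflect (k : Nat) (f : Nat → Int) :
    ((List.range k).map (fun j => f (k - 1 - j))).sum = ((List.range k).map f).sum := by
  rw [show ((List.range k).map (fun j => f (k-1-j))).sum = ∑ j ∈ Finset.range k, f (k-1-j) from rfl,
      Finset.sum_range_reflect]
  rfl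

theorem toBsLoop_eq (x : Int) : toBsLoop x = natBits x.natAbs := by
  induction hn : x.natAbs using Nat.strong_induction_on generalizing x with
  | _ n ih =>
    subst hn
    by_cases h : x = 0
    · simp [toBsLoop, natBits, h]
    · rw [toBsLoop, if_neg h, natBits, if_neg (by omega : ¬ x.natAbs = 0)]
      congr 1
      · rw [PySem.Int.mod_eq_emod_of_pos (by omega)]; omega
      · rw [ih ((PySem.Int.truncdiv x 2).natAbs) (by rw [pv_truncdiv_two_natAbs]; omega) _ rfl,
          pv_truncdiv_two_natAbs]

theorem length_natBits (m : Nat) : (natBits m).length = PySem.Int.bitLength (m : Int) := by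
  induction m using Nat.strong_induction_on with
  | _ m ih =>
    by_cases h : m = 0
    · simp [natBits, h]
    · rw [natBits, if_neg h, PySem.Int.bitLength_natCast (by omega)]
      simp [ih (m/2) (by omega)]

theorem getElem?_natBits (m j : Nat) (hj : j < (natBits m).length) :
    (natBits m)[j]? = some (bv m j) := by
  induction m using Nat.strong_induction_on generalizing j with
  | _ m ih =>
    by_cases h : m = 0
    · rw [natBits, if_pos h] at hj; simp at hj
    · rw [natBits, if_neg h] at hj ⊢
      cases j with
      | zero => simp [bv]
      | succ j =>
        simp only [List.getElem?_cons_succ]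
        rw [ih (m/2) (by omega) j (by simpa using hj), bv, bv,
          Nat.div_div_eq_div_mul, ← pow_succ']

theorem div_pow_eq_zero (m j : Nat) (h : PySem.Int.bitLength (m : Int) ≤ j) : m / 2 ^ j = 0 := by
  apply Nat.div_eq_of_lt
  calc m = (m:Int).natAbs := rfl
  _ < 2 ^ PySem.Int.bitLength (m:Int) := PySem.Int.lt_two_pow_bitLength _
  _ ≤ 2 ^ j := Nat.pow_le_pow_right (by omega) h

theorem band_one_bv (m s0 k : Nat) :
    PySem.Int.band (((m >>> s0 : Nat) : Int) >>> ((k : Nat) : Int)) 1 = bv m (k + s0) := by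
  rw [Int.shiftRight_natCast, show (1:Int) = ((1:Nat):Int) from rfl, PySem.Int.band_natCast,
    Nat.and_one_is_mod, Nat.shiftRight_eq_div_pow, Nat.shiftRight_eq_div_pow,
    Nat.div_div_eq_div_mul, ← pow_add, bv, Nat.add_comm s0 k]

theorem band_one_bv' (m s0 k : Nat) :
    PySem.Int.band (((m >>> s0 : Nat) : Int) >>> (((k : Nat) : Int) + 1)) 1 = bv m (k + 1 + s0) := by
  rw [show ((k:Int) + 1) = (((k + 1 : Nat)) : Int) by push_cast; ring]
  exact band_one_bv m s0 (k+1)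

theorem coefA_eq_sum (s : List Int) (n : Int) (f : Nat → Int) (hn : 1 < n)
    (hget : ∀ j, j < n.toNat → s[j]? = some (f j)) :
    coefA s n = ((List.range (n-1).toNat).map (fun j => if f j = f (j+1) then (1:Int) else -1)).sum := by
  unfold coefA
  rw [PySem.List.pyRange_one]
  simp only [List.foldl_map, sub_zero, zero_add]
  rw [PySem.List.foldl_congr_mem _ _
      (fun (coef : Int) (j : Nat) => coef + (if f j = f (j+1) then (1:Int) else -1)) 0 ?_]
  · rw [PySem.List.foldl_add]; simp
  · intro acc j hj
    rw [List.mem_range] at hj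
    have h1 : PySem.List.pyGet? s (j : Int) = some (f j) := by
      rw [PySem.List.pyGet?_natCast]; exact hget j (by omega)
    have h2 : PySem.List.pyGet? s ((j : Int) + 1) = some (f (j+1)) := by
      rw [show ((j:Int) + 1) = ((j+1 : Nat) : Int) by push_cast; ring, PySem.List.pyGet?_natCast]
      exact hget (j+1) (by omega)
    rw [h1, h2]
    rcases eq_or_ne (f j) (f (j+1)) with h | h
    · simp [h]
    · simp [h]; ring

theorem coefB_eq_sum (m s0 : Nat) (n : Int) :
    coefB ((m >>> s0 : Nat) : Int) n
      = ((List.range (n-1).toNat).map (fun j => gPair m (j+s0) (j+1+s0))).sum := by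
  unfold coefB
  rw [PySem.List.pyRange_one]
  simp only [List.foldl_map, sub_zero, zero_add]
  rw [PySem.List.foldl_congr_mem _ _
      (fun (coef : Int) (j : Nat) => coef + gPair m (j+s0) (j+1+s0)) 0 ?_]
  · rw [PySem.List.foldl_add]; simp
  · intro acc j hj
    have e1 : ((j : Int)).toNat = j := by omega
    rw [e1, band_one_bv m s0 j, band_one_bv' m s0 j]
    rfl

theorem key_coef (u n : Int) (hn : 1 < n) :
    coefA (to_bs u n) n =
      coefB (if n < (PySem.Int.bitLength |u + 1| : Int)
             then |u + 1| >>> (PySem.Int.bitLength |u + 1| - n.toNat) else |u + 1|) n := by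
  have habs : |u + 1| = ((u + 1).natAbs : Int) := Int.abs_eq_natAbs _
  by_cases hx : u + 1 = 0
  · -- x = 0: s is n zeros, top = 0
    have hs : to_bs u n = List.replicate n.toNat 0 := by simp [to_bs, hx]
    have htop : (if n < (PySem.Int.bitLength |u + 1| : Int)
             then |u + 1| >>> (PySem.Int.bitLength |u + 1| - n.toNat) else |u + 1|)
        = (((0 >>> 0 : Nat)) : Int) := by
      rw [hx]
      simp [PySem.Int.bitLength_zero]
    rw [hs, htop, coefA_eq_sum _ n (fun _ => (0:Int)) hn
        (by intro j hj; simp [hj]),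
      coefB_eq_sum 0 0 n]
    apply congrArg
    apply List.map_congr_left
    intro j hj
    simp [gPair, bv]
  · -- x ≠ 0
    set m : Nat := (u + 1).natAbs with hm
    have hm0 : m ≠ 0 := by omega
    set b : Nat := PySem.Int.bitLength (m : Int) with hb
    have hb0 : 0 < b := by
      rw [hb, PySem.Int.bitLength_natCast (by omega)]; omega
    set nn : Nat := n.toNat with hnn
    have hnn2 : 2 ≤ nn := by omega
    set s0 : Nat := b - nn with hs0
    set L : Nat := max b nn with hL
    set pl : List Int := natBits m ++ List.replicate ((n : Int) - ((natBits m).length : Int)).toNat 0 with hpl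
    have hlen : (natBits m).length = b := length_natBits m
    have hplen : pl.length = L := by
      rw [hpl, List.length_append, List.length_replicate, hlen]
      omega
    have hget : ∀ j, j < L → pl[j]? = some (bv m j) := by
      intro j hj
      by_cases hjb : j < b
      · rw [hpl, List.getElem?_append_left (by omega : j < (natBits m).length)]
        exact getElem?_natBits m j (by omega)
      · rw [hpl, List.getElem?_append_right (by omega : (natBits m).length ≤ j)]
        have hz : m / 2 ^ j = 0 := div_pow_eq_zero m j (by omega)
        rw [List.getElem?_replicate]
        rw [if_pos (by omega), bv, hz]
        simp
    have hs : to_bs u n = pl.reverse := by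
      unfold to_bs
      simp only [if_neg hx]
      rw [toBsLoop_eq, hpl]
    have htop : (if n < (PySem.Int.bitLength |u + 1| : Int)
             then |u + 1| >>> (PySem.Int.bitLength |u + 1| - n.toNat) else |u + 1|)
        = ((m >>> s0 : Nat) : Int) := by
      rw [habs]
      by_cases hc : n < (b : Int)
      · rw [if_pos (by rw [← hb]; exact hc)]
        rfl
      · rw [if_neg (by rw [← hb]; exact hc)]
        have : s0 = 0 := by omega
        rw [this]
        rfl
    rw [hs, htop, coefB_eq_sum m s0 n,
      coefA_eq_sum _ n (fun j => bv m (L - 1 - j)) hn ?_]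
    · apply Eq.trans ?_ (sum_reflect (n-1).toNat (fun j => gPair m (j+s0) (j+1+s0)))
      apply congrArg
      apply List.map_congr_left
      intro j hj
      rw [List.mem_range] at hj
      have hk : (n-1).toNat = nn - 1 := by omega
      have e1 : L - 1 - j = ((nn - 1) - 1 - j) + 1 + s0 := by omega
      have e2 : L - 1 - (j + 1) = ((nn - 1) - 1 - j) + s0 := by omega
      show (if bv m (L-1-j) = bv m (L-1-(j+1)) then (1:Int) else -1) = _
      rw [show (if bv m (L-1-j) = bv m (L-1-(j+1)) then (1:Int) else -1)
            = gPair m (L-1-j) (L-1-(j+1)) from rfl,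
        e1, e2, gPair_comm, hk]
    · intro j hj
      rw [List.getElem?_reverse (by omega : j < pl.length), hplen]
      exact hget (L - 1 - j) (by omega)

-- ===== VERDICT (by name: the statement is the Claim_ definition above) =====
theorem ZZona_spec : Claim_equal_ZZona := by
  intro a n _hD
  show ZZona a n = ZZona_alt a n
  by_cases hn : n ≤ 1
  · unfold ZZona ZZona_alt
    rw [if_pos hn]
    have : (PySem.List.pyRange 0 (n - 1) 1) = [] := PySem.List.pyRange_one_eq_nil (by omega)
    congr 1
    apply PySem.List.foldl_congr_mem
    intro acc p _
    simp [coefA, this]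
  · unfold ZZona ZZona_alt
    rw [if_neg hn]
    congr 1
    apply PySem.List.foldl_congr_mem
    intro acc p _
    simp only []
    rw [key_coef p.1 n (by omega)]
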